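-- pv_equiv track=rewrite | github.com/hhyi01/aoc_2018 | Day 2/p_02.py | string_comparison
-- ===== SOURCE A (Python) =====
-- def string_comparison(word1, word2):
--   overlap_count = {}
--   counter = 0
--   key = ''
--   for i in range(0, len(word1)):
--     if word1[i] == word2[i]:
--       key = key + word1[i]
--       counter += 1
--   if counter == (len(word1) - 1):
--     overlap_count[key] = counter
--   return overlap_count
-- ===== SOURCE B (Python) =====
-- def string_comparison(word1, word2):
--   diffs = [i for i in range(len(word1)) if word1[i] != word2[i]]
--   if len(diffs) == 1:
--     idx = diffs[0]
--     return {word1[:idx] + word1[idx+1:]: len(word1) - 1}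
--   return {}
-- ===== Notes on version B (the rewrite author's own statement) =====
-- stated objective: simpler
-- what changed: Instead of concatenating matching characters one by one while counting them, B collects the differing positions and, when there is exactly one, removes it from word1 by slicing and returns len(word1)-1 directly.
import Mathlib
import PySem

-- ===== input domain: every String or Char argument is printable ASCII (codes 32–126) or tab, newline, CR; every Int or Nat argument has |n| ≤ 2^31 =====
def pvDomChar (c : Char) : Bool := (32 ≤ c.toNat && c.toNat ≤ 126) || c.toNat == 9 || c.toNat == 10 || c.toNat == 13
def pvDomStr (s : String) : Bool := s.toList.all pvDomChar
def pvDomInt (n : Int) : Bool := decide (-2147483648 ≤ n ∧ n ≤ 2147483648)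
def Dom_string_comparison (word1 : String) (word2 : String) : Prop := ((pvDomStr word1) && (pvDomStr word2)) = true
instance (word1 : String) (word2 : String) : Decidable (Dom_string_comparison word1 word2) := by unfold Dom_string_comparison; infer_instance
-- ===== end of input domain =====

-- B locates the single differing position and removes it from word1 by slicing, instead
-- of concatenating the matching characters one by one while counting them (simpler).

-- ===== PORT A =====
-- counter/key accumulation over range(len(word1)); the `| _, _ => s` match arm is the
-- out-of-range case in which Python raises IndexError (excluded by Pre_).
def string_comparison (word1 : String) (word2 : String) : List (String × Int) :=
  let n : Int := PySem.Str.len word1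
  let st : String × Int :=
    (PySem.List.pyRange 0 n 1).foldl
      (fun (s : String × Int) i =>
        match PySem.Str.pyGet? word1 i, PySem.Str.pyGet? word2 i with
        | some a, some b => if a = b then (s.1 ++ String.singleton a, s.2 + 1) else s
        | _, _ => s)
      ("", 0)
  if st.2 = n - 1 then [(st.1, st.2)] else []

-- ===== PORT B =====
-- diffs = [i for i in range(len(word1)) if word1[i] != word2[i]]; if len(diffs) == 1 then
-- {word1[:idx] + word1[idx+1:]: len(word1) - 1} else {}.  The comparison of the two
-- Option values is the indexing test word1[i] != word2[i] (both in range under Pre_;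
-- out of range is Python's IndexError, excluded by Pre_).
def string_comparison_alt (word1 : String) (word2 : String) : List (String × Int) :=
  let n : Int := PySem.Str.len word1
  let diffs : List Int :=
    (PySem.List.pyRange 0 n 1).filter
      (fun i => !(PySem.Str.pyGet? word1 i == PySem.Str.pyGet? word2 i))
  match diffs with
  | [idx] =>
      [(PySem.Str.slice word1 none (some idx) ++ PySem.Str.slice word1 (some (idx + 1)) none,
        n - 1)]
  | _ => []

-- ===== PRECONDITION & SPEC =====
-- Pre_ excludes exactly the inputs on which Python A raises IndexError: word2 shorter
-- than word1 (word2[i] is evaluated for every i in range(len(word1))). B raises there too.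
def Pre_string_comparison (word1 : String) (word2 : String) : Prop :=
  word1.toList.length ≤ word2.toList.length
instance (word1 : String) (word2 : String) : Decidable (Pre_string_comparison word1 word2) := by
  unfold Pre_string_comparison; infer_instance
def pvWitness_string_comparison : String × String := ("abc", "axc")

def Spec_string_comparison (word1 : String) (word2 : String) (out : List (String × Int)) : Prop := out = string_comparison_alt word1 word2
instance (word1 : String) (word2 : String) (out : List (String × Int)) : Decidable (Spec_string_comparison word1 word2 out) := by unfold Spec_string_comparison; infer_instance

-- ===== CLAIM (what is proved, stated in full; the proofs are below) =====
def Claim_equal_string_comparison : Prop := ∀ (word1 : String) (word2 : String), Dom_string_comparison word1 word2 → Pre_string_comparison word1 word2 → Spec_string_comparison word1 word2 (string_comparison word1 word2)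

-- ===== LEMMAS AND PROOFS =====

-- the per-position match test of the loops, on the list side
def pvMatch (w1 w2 : List Char) (k : Nat) : Bool := w1[k]? == w2[k]?

lemma pvFoldA (word1 word2 : String) (m : Nat) (hm : m ≤ word1.toList.length) :
    ((List.range m).map (fun k : Nat => (k : Int))).foldl
      (fun (s : String × Int) i =>
        match PySem.Str.pyGet? word1 i, PySem.Str.pyGet? word2 i with
        | some a, some b => if a = b then (s.1 ++ String.singleton a, s.2 + 1) else s
        | _, _ => s)
      ("", 0)
    = (String.ofList (((List.range m).filter (pvMatch word1.toList word2.toList)).map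
          (fun k => word1.toList.getD k 'x')),
       (((List.range m).filter (pvMatch word1.toList word2.toList)).length : Int)) := by
  induction m with
  | zero =>
    apply Prod.ext
    · apply String.ext; simp
    · simp
  | succ m ih =>
    have hm' : m < word1.toList.length := by omega
    rw [List.range_succ]
    simp only [List.map_append, List.foldl_append, List.map_cons, List.map_nil, List.foldl_cons, List.foldl_nil]
    rw [ih (by omega)]
    rw [List.filter_append]
    have h1 : PySem.Str.pyGet? word1 (m : Int) = some (word1.toList[m]) := by
      simp [List.getElem?_eq_getElem hm']
    rw [h1]
    cases h2 : word2.toList[m]? with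
    | none =>
      have : PySem.Str.pyGet? word2 (m : Int) = none := by simp [h2]
      rw [this]
      have : pvMatch word1.toList word2.toList m = false := by
        simp [pvMatch, List.getElem?_eq_getElem hm', h2]
      simp [this]
    | some b =>
      have hg : PySem.Str.pyGet? word2 (m : Int) = some b := by simp [h2]
      rw [hg]
      by_cases he : word1.toList[m] = b
      · have : pvMatch word1.toList word2.toList m = true := by
          simp [pvMatch, List.getElem?_eq_getElem hm', h2, he]
        simp only [List.filter_cons, this, if_pos, List.filter_nil, List.map_append,
          List.length_append]
        rw [if_pos he]
        apply Prod.ext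
        · apply String.ext
          simp [List.getElem?_eq_getElem hm']
        · push_cast
          simp
      · have : pvMatch word1.toList word2.toList m = false := by
          simp [pvMatch, List.getElem?_eq_getElem hm', h2, he]
        simp [this, if_neg he]

lemma pvMapGetD_range (l : List Char) (j m : Nat) (h : j + m ≤ l.length) :
    (List.range m).map (fun k => l.getD (j + k) 'x') = (l.drop j).take m := by
  apply List.ext_getElem
  · simp; omega
  · intro i h1 h2
    simp at h1 ⊢
    rw [List.getElem?_eq_getElem (by omega)]
    simp [Nat.add_comm j i]

lemma pvFilterNe (n k0 : Nat) (hk : k0 < n) :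
    (List.range n).filter (fun k => decide ¬(k = k0))
      = List.range k0 ++ (List.range (n - k0 - 1)).map (fun k => k0 + 1 + k) := by
  have hn : n = k0 + ((n - k0 - 1) + 1) := by omega
  rw [hn, List.range_add, List.filter_append, List.range_succ_eq_map]
  rw [List.filter_eq_self.mpr (by intro a ha; simp at ha ⊢; omega)]
  simp only [List.map_cons, List.map_map, List.filter_cons]
  norm_num
  rw [List.filter_eq_self.mpr (by intro a ha; simp at ha ⊢; omega)]
  congr 1
  funext k
  simp [Nat.succ_eq_add_one]; omega

lemma pvEquiv (word1 word2 : String) (_hpre : word1.toList.length ≤ word2.toList.length) :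
    string_comparison word1 word2 = string_comparison_alt word1 word2 := by
  simp only [string_comparison, string_comparison_alt]
  rw [PySem.Str.len_eq, PySem.List.pyRange_zero_natCast word1.toList.length]
  rw [pvFoldA word1 word2 word1.toList.length le_rfl]
  have hfB : (List.filter (fun i => !(PySem.Str.pyGet? word1 i == PySem.Str.pyGet? word2 i))
        ((List.range word1.toList.length).map (fun k : Nat => (k : Int))))
      = ((List.range word1.toList.length).filter
          (fun k => !pvMatch word1.toList word2.toList k)).map (fun k : Nat => (k : Int)) := by
    rw [List.filter_map]
    exact congrArg _ (List.filter_congr (by intro k _; simp [pvMatch, Function.comp]))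
  rw [hfB]
  have hsplit := List.length_eq_length_filter_add (l := List.range word1.toList.length)
      (pvMatch word1.toList word2.toList)
  simp only [List.length_range] at hsplit
  cases hnd : (List.range word1.toList.length).filter
      (fun k => !pvMatch word1.toList word2.toList k) with
  | nil =>
    have hc : ((List.range word1.toList.length).filter (pvMatch word1.toList word2.toList)).length
        = word1.toList.length := by rw [hnd] at hsplit; simpa using hsplit.symm
    have hno : ¬ (((((List.range word1.toList.length).filter
        (pvMatch word1.toList word2.toList)).length : Nat) : Int)
        = (word1.toList.length : Int) - 1) := by rw [hc]; omega
    simp only [List.map_nil]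
    rw [if_neg hno]
  | cons k0 tl =>
    cases tl with
    | nil =>
      have hk0mem : k0 ∈ (List.range word1.toList.length).filter
          (fun k => !pvMatch word1.toList word2.toList k) := by
        rw [hnd]; exact List.mem_singleton.mpr rfl
      have hk0n : k0 < word1.toList.length := by
        have := List.mem_filter.mp hk0mem
        simpa using this.1
      have hc : ((List.range word1.toList.length).filter
          (pvMatch word1.toList word2.toList)).length = word1.toList.length - 1 := by
        rw [hnd] at hsplit; simp only [List.length_cons, List.length_nil] at hsplit; omega
      have hcond : ((((List.range word1.toList.length).filter
          (pvMatch word1.toList word2.toList)).length : Nat) : Int)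
          = (word1.toList.length : Int) - 1 := by rw [hc]; omega
      simp only [List.map_cons, List.map_nil, hcond, if_pos]
      -- the match now sees [↑k0]
      show [(String.ofList _, _)] = [(_, _)]
      have hfilter : (List.range word1.toList.length).filter (pvMatch word1.toList word2.toList)
          = (List.range word1.toList.length).filter (fun k => decide ¬(k = k0)) := by
        apply List.filter_congr
        intro k hk
        by_cases hkk : k = k0
        · subst hkk
          have := (List.mem_filter.mp hk0mem).2
          simp at this ⊢
          simp [this]
        · have hnm : ¬ (k ∈ (List.range word1.toList.length).filter
              (fun k => !pvMatch word1.toList word2.toList k)) := by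
            rw [hnd]; simp [hkk]
          have hp : pvMatch word1.toList word2.toList k = true := by
            by_contra hfalse
            exact hnm (List.mem_filter.mpr ⟨hk, by simp [Bool.not_eq_true] at hfalse ⊢; exact hfalse⟩)
          simp [hp, hkk]
      congr 1
      apply Prod.ext
      · apply String.ext
        rw [hfilter, pvFilterNe word1.toList.length k0 hk0n, List.map_append]
        simp only [String.toList_append, String.toList_ofList, PySem.Str.toList_slice,
          PySem.Chars.slice_eq_listSlice]
        rw [PySem.List.slice_to_natCast]
        have hc1 : ((k0 : Int) + 1) = ((k0 + 1 : Nat) : Int) := by push_cast; ring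
        rw [hc1, PySem.List.slice_from_natCast]
        congr 1
        · have := pvMapGetD_range word1.toList 0 k0 (by omega)
          simpa using this
        · rw [List.map_map]
          have h3 := pvMapGetD_range word1.toList (k0 + 1) (word1.toList.length - k0 - 1) (by omega)
          calc (List.range (word1.toList.length - k0 - 1)).map
                ((fun k => word1.toList.getD k 'x') ∘ (fun k => k0 + 1 + k))
              = (List.range (word1.toList.length - k0 - 1)).map
                (fun k => word1.toList.getD (k0 + 1 + k) 'x') := rfl
            _ = (word1.toList.drop (k0 + 1)).take (word1.toList.length - k0 - 1) := h3
            _ = word1.toList.drop (k0 + 1) := List.take_of_length_le (by simp; omega)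
      · rfl
    | cons k1 tl' =>
      have hc2 : ((List.range word1.toList.length).filter
          (pvMatch word1.toList word2.toList)).length + (2 + tl'.length) = word1.toList.length := by
        rw [hnd] at hsplit; simp only [List.length_cons] at hsplit; omega
      have hno : ¬ (((((List.range word1.toList.length).filter
          (pvMatch word1.toList word2.toList)).length : Nat) : Int)
          = (word1.toList.length : Int) - 1) := by omega
      simp only [List.map_cons]
      rw [if_neg hno]

-- ===== VERDICT (by name: the statement is the Claim_ definition above) =====
theorem string_comparison_spec : Claim_equal_string_comparison := by
  intro word1 word2 _ hpre
  unfold Spec_string_comparison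
  exact pvEquiv word1 word2 hpre
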